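-- pv_equiv track=rewrite | github.com/Himaja-afk/multilinefasta_singlelinefasta | app.py | multiline_to_singleline_fasta
-- ===== SOURCE A (Python) =====
-- def multiline_to_singleline_fasta(input_text):
--     lines = input_text.splitlines()
--     output = []
--     header = None
--     sequence = []
--
--     for line in lines:
--         line = line.strip()
--         if not line:
--             continue
--         if line.startswith(">"):
--             if header:
--                 output.append(header)
--                 output.append("".join(sequence))
--             header = line
--             sequence = []
--         else:
--             sequence.append(line)
--
--     if header:
--         output.append(header)
--         output.append("".join(sequence))
--
--     return "\n".join(output)
-- ===== SOURCE B (Python) =====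
-- def multiline_to_singleline_fasta(input_text):
--     # Pass 1: parse into a list of records, each record = [header, seq_line, ...]
--     records = []
--     for raw in input_text.splitlines():
--         line = raw.strip()
--         if not line:
--             continue
--         if line.startswith(">"):
--             records.append([line])
--         elif records:
--             records[-1].append(line)
--     # Pass 2: format each record as header + joined sequence
--     parts = []
--     for rec in records:
--         parts.append(rec[0])
--         parts.append("".join(rec[1:]))
--     return "\n".join(parts)
-- ===== Notes on version B (the rewrite author's own statement) =====
-- stated objective: alternative
-- what changed: B separates parsing from formatting: a first pass builds an explicit list of records (header plus its sequence lines), a second pass formats each record, instead of A's single pass with header/sequence accumulator state flushed inline.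
import Mathlib
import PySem

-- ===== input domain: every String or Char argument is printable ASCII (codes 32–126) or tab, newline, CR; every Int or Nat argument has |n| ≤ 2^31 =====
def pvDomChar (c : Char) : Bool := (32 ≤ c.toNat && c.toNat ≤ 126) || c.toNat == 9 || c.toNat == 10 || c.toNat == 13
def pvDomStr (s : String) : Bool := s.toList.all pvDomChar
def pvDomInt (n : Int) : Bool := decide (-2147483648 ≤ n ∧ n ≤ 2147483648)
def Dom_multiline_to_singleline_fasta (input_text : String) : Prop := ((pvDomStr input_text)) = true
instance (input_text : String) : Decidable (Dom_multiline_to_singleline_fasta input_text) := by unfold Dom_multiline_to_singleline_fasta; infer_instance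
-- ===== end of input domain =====

-- B parses into an explicit list of records then formats them, instead of A's inline flush; same behaviour, alternative decomposition.

-- ===== PORT A =====
-- state: (output, header, sequence)
def pvStepA (st : List String × Option String × List String) (raw : String) :
    List String × Option String × List String :=
  let line := PySem.Str.strip raw
  if line = "" then st
  else if PySem.Str.startswith line ">" then
    match st with
    | (output, some h, sequence) =>
      if h ≠ "" then (output ++ [h, PySem.Str.join "" sequence], some line, [])
      else (output, some line, [])
    | (output, none, _) => (output, some line, [])
  else (st.1, st.2.1, st.2.2 ++ [line])

-- trailing 'if header:' flush
def pvFlushA (st : List String × Option String × List String) : List String :=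
  match st with
  | (output, some h, sequence) =>
    if h ≠ "" then output ++ [h, PySem.Str.join "" sequence] else output
  | (output, none, _) => output

def multiline_to_singleline_fasta (input_text : String) : String :=
  let lines := PySem.Str.splitlines input_text
  let st := lines.foldl pvStepA ([], none, [])
  PySem.Str.join "\n" (pvFlushA st)

-- ===== PORT B =====
-- records[-1].append(line) (no-op when records is empty, matching 'elif records:')
def pvAppendToLast (recs : List (List String)) (line : String) : List (List String) :=
  match recs with
  | [] => []
  | [r] => [r ++ [line]]
  | r :: rs => r :: pvAppendToLast rs line

def pvParse (recs : List (List String)) (raw : String) : List (List String) :=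
  let line := PySem.Str.strip raw
  if line = "" then recs
  else if PySem.Str.startswith line ">" then recs ++ [[line]]
  else pvAppendToLast recs line

-- rec[0] and "".join(rec[1:]) (records are never empty lists)
def pvFormat (recs : List (List String)) : List String :=
  recs.foldl (fun parts rec => parts ++ [rec.headD "", PySem.Str.join "" (rec.drop 1)]) []

def multiline_to_singleline_fasta_alt (input_text : String) : String :=
  let records := (PySem.Str.splitlines input_text).foldl pvParse []
  PySem.Str.join "\n" (pvFormat records)

-- ===== PRECONDITION & SPEC =====
def Spec_multiline_to_singleline_fasta (input_text : String) (out : String) : Prop := out = multiline_to_singleline_fasta_alt input_text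
instance (input_text : String) (out : String) : Decidable (Spec_multiline_to_singleline_fasta input_text out) := by unfold Spec_multiline_to_singleline_fasta; infer_instance

-- ===== CLAIM (what is proved, stated in full; the proofs are below) =====
def Claim_equal_multiline_to_singleline_fasta : Prop := ∀ (input_text : String), Dom_multiline_to_singleline_fasta input_text → Spec_multiline_to_singleline_fasta input_text (multiline_to_singleline_fasta input_text)

-- ===== LEMMAS AND PROOFS =====

-- invariant tying A's (output, header, sequence) to B's record list
def pvRel (st : List String × Option String × List String) (recs : List (List String)) : Prop :=
  match st with
  | (output, none, _) => output = [] ∧ recs = []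
  | (output, some h, sequence) =>
      h ≠ "" ∧ ∃ rs, recs = rs ++ [h :: sequence] ∧ output = pvFormat rs

theorem pvFormat_eq_flatMap (recs : List (List String)) :
    pvFormat recs
      = recs.flatMap (fun rec => [rec.headD "", PySem.Str.join "" (rec.drop 1)]) := by
  simpa [pvFormat] using
    PySem.List.foldl_append_eq_flatMap
      (fun rec => [rec.headD "", PySem.Str.join "" (rec.drop 1)]) recs []

theorem pvFormat_append_singleton (rs : List (List String)) (r : List String) :
    pvFormat (rs ++ [r]) = pvFormat rs ++ [r.headD "", PySem.Str.join "" (r.drop 1)] := by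
  simp [pvFormat_eq_flatMap]

theorem pvAppendToLast_append_singleton (rs : List (List String)) (r : List String)
    (line : String) : pvAppendToLast (rs ++ [r]) line = rs ++ [r ++ [line]] := by
  induction rs with
  | nil => simp [pvAppendToLast]
  | cons a t ih =>
    cases t with
    | nil => simp [pvAppendToLast]
    | cons b t' => simpa [pvAppendToLast] using ih

theorem pvStep_rel (st : List String × Option String × List String)
    (recs : List (List String)) (raw : String) (h : pvRel st recs) :
    pvRel (pvStepA st raw) (pvParse recs raw) := by
  obtain ⟨output, header, sequence⟩ := st
  by_cases he : PySem.Str.strip raw = ""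
  · simpa [pvStepA, pvParse, he] using h
  · by_cases hs : PySem.Chars.startswith (PySem.Chars.strip raw.toList) ['>'] = true
    · cases header with
      | none =>
        obtain ⟨ho, hr⟩ := h
        simp [pvStepA, pvParse, he, hs, pvRel, ho, hr, pvFormat]
      | some hh =>
        obtain ⟨hne, rs, hr, ho⟩ := h
        simp [pvStepA, pvParse, he, hs, pvRel, hne, hr, ho]
        exact ⟨rs ++ [hh :: sequence], by simp, by simp [pvFormat_append_singleton]⟩
    · cases header with
      | none =>
        obtain ⟨ho, hr⟩ := h
        simp [pvStepA, pvParse, he, hs, pvRel, ho, hr, pvAppendToLast]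
      | some hh =>
        obtain ⟨hne, rs, hr, ho⟩ := h
        simp [pvStepA, pvParse, he, hs, pvRel, hne]
        exact ⟨rs, by simp [hr, pvAppendToLast_append_singleton], ho⟩

theorem pvLoop_rel (lines : List String) (st : List String × Option String × List String)
    (recs : List (List String)) (h : pvRel st recs) :
    pvRel (lines.foldl pvStepA st) (lines.foldl pvParse recs) := by
  induction lines generalizing st recs with
  | nil => exact h
  | cons l ls ih => exact ih _ _ (pvStep_rel _ _ _ h)

theorem pvFlush_eq (st : List String × Option String × List String)
    (recs : List (List String)) (h : pvRel st recs) : pvFlushA st = pvFormat recs := by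
  obtain ⟨output, header, sequence⟩ := st
  cases header with
  | none =>
    obtain ⟨ho, hr⟩ := h
    simp [pvFlushA, ho, hr, pvFormat]
  | some hh =>
    obtain ⟨hne, rs, hr, ho⟩ := h
    simp [pvFlushA, hne, hr, ho, pvFormat_append_singleton]

-- ===== VERDICT (by name: the statement is the Claim_ definition above) =====
theorem multiline_to_singleline_fasta_spec : Claim_equal_multiline_to_singleline_fasta := by
  intro input_text _
  unfold Spec_multiline_to_singleline_fasta multiline_to_singleline_fasta
    multiline_to_singleline_fasta_alt
  have h := pvLoop_rel (PySem.Str.splitlines input_text) ([], none, []) [] ⟨rfl, rfl⟩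
  simp [pvFlush_eq _ _ h]
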